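-- pv_equiv track=rewrite | github.com/nmontpetit/Advent-of-Code-2023 | day_20/aoc_template.py | get_inputs_for_conjunctions
-- ===== SOURCE A (Python) =====
-- def get_inputs_for_conjunctions(
--         data: dict[str, tuple[str, list[str]]]
--         ) -> dict[str, list[str]]:
--
--     dict_conjunctions = {
--         key: []
--         for key, val
--         in data.items()
--         if val[0] == '&'
--     }
--
--     for key, value in data.items():
--         for output in value[1]:
--             if output in dict_conjunctions:
--                 dict_conjunctions[output] += [key]
--
--     return dict_conjunctions
-- ===== SOURCE B (Python) =====
-- def get_inputs_for_conjunctions(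
--         data: dict[str, tuple[str, list[str]]]
--         ) -> dict[str, list[str]]:
--     # gather per conjunction key instead of scattering each edge onto its target
--     conjunctions = [key for key, val in data.items() if val[0] == '&']
--     return {
--         key: [k for k, v in data.items() for out in v[1] if out == key]
--         for key in conjunctions
--     }
-- ===== Notes on version B (the rewrite author's own statement) =====
-- stated objective: alternative
-- what changed: Replaces the mutate-in-place edge-scatter loop (push each out-edge onto its target's list in a pre-built dict) with a per-conjunction gather comprehension that builds each input list in one expression by scanning all out-edges for that key.
import Mathlib
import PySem

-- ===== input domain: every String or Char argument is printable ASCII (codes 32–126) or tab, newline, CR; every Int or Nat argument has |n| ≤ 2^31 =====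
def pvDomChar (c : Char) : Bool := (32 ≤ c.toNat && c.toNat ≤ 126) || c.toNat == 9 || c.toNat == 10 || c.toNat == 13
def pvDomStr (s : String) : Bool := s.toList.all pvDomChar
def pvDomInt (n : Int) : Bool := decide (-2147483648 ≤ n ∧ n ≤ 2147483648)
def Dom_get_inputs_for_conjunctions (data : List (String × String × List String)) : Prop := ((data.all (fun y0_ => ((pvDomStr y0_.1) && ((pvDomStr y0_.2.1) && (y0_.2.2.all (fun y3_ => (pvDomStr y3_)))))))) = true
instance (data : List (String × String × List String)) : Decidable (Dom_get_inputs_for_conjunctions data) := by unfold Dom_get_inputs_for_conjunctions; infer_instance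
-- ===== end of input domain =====

-- B gathers each conjunction's inputs with a per-key comprehension instead of A's edge-scatter mutation; alternative decomposition, same results.


-- ===== PORT A =====
-- dict comprehension (key ↦ [] for '&' nodes), then scatter every out-edge onto its target
def get_inputs_for_conjunctions (data : List (String × String × List String)) : List (String × List String) :=
  (data.foldl
      (fun d kv =>
        kv.2.2.foldl
          (fun d output =>
            if d.contains output then d.modify output [] (fun l => l ++ [kv.1]) else d)
          d)
      (data.foldl
        (fun d kv => if kv.2.1 == "&" then d.insert kv.1 ([] : List String) else d)
        PySem.Dict.empty)).items

-- ===== PORT B =====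
-- conjunction keys first, then for each key gather the sources of all edges into it
def get_inputs_for_conjunctions_alt (data : List (String × String × List String)) : List (String × List String) :=
  ((data.filter (fun kv => kv.2.1 == "&")).map (fun kv => kv.1)).map
    (fun key =>
      (key, data.flatMap (fun kv => (kv.2.2.filter (fun out => out == key)).map (fun _ => kv.1))))

-- ===== PRECONDITION & SPEC =====
-- Pre_ only requires the association list to encode a Python dict: keys pairwise distinct (A's input type is a dict, so no input A accepts is excluded).
def Pre_get_inputs_for_conjunctions (data : List (String × String × List String)) : Prop :=
  (data.map (fun kv => kv.1)).Nodup
instance (data : List (String × String × List String)) : Decidable (Pre_get_inputs_for_conjunctions data) := by unfold Pre_get_inputs_for_conjunctions; infer_instance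

def pvWitness_get_inputs_for_conjunctions : (List (String × String × List String)) :=
  [("a", "%", ["c", "b"]), ("c", "&", ["a"]), ("b", "&", ["c", "c"])]

def Spec_get_inputs_for_conjunctions (data : List (String × String × List String)) (out : List (String × List String)) : Prop := out = get_inputs_for_conjunctions_alt data
instance (data : List (String × String × List String)) (out : List (String × List String)) : Decidable (Spec_get_inputs_for_conjunctions data out) := by unfold Spec_get_inputs_for_conjunctions; infer_instance

-- ===== CLAIM (what is proved, stated in full; the proofs are below) =====
def Claim_equal_get_inputs_for_conjunctions : Prop := ∀ (data : List (String × String × List String)), Dom_get_inputs_for_conjunctions data → Pre_get_inputs_for_conjunctions data → Spec_get_inputs_for_conjunctions data (get_inputs_for_conjunctions data)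

-- ===== LEMMAS AND PROOFS =====

-- mapping a function that fixes every element is the identity
theorem pvMapSelf {α : Type} (l : List α) (f : α → α) (h : ∀ x ∈ l, f x = x) : l.map f = l := by
  induction l with
  | nil => rfl
  | cons a t ih => simp [h a (by simp), ih (fun x hx => h x (by simp [hx]))]

-- the guarded scatter step never changes which keys are present (inner loop over one node's outputs)
theorem pvInner_contains (k c : String) (outs : List String) (d : PySem.Dict String (List String)) :
    (outs.foldl (fun d output => if d.contains output then d.modify output [] (fun l => l ++ [k]) else d) d).contains c
      = d.contains c := by
  induction outs generalizing d with
  | nil => rfl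
  | cons o t ih =>
    simp only [List.foldl_cons]
    by_cases h : d.contains o = true
    · rw [if_pos h, ih, PySem.Dict.contains_modify]
      by_cases hc : c = o
      · subst hc; simp [h]
      · simp [hc]
    · rw [if_neg h, ih]

theorem pvInner_keys (k : String) (outs : List String) (d : PySem.Dict String (List String)) :
    (outs.foldl (fun d output => if d.contains output then d.modify output [] (fun l => l ++ [k]) else d) d).keys
      = d.keys := by
  induction outs generalizing d with
  | nil => rfl
  | cons o t ih =>
    simp only [List.foldl_cons]
    by_cases h : d.contains o = true
    · rw [if_pos h, ih, PySem.Dict.keys_modify, PySem.Dict.keys_insert_of_contains _ _ h]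
    · rw [if_neg h, ih]

-- one node's outputs append exactly its matching edges to a key that is present
theorem pvInner_getD (k c : String) (outs : List String) (d : PySem.Dict String (List String))
    (hc : d.contains c = true) :
    (outs.foldl (fun d output => if d.contains output then d.modify output [] (fun l => l ++ [k]) else d) d).getD c []
      = d.getD c [] ++ (outs.filter (fun o => o == c)).map (fun _ => k) := by
  induction outs generalizing d with
  | nil => simp
  | cons o t ih =>
    simp only [List.foldl_cons, List.filter_cons]
    by_cases h : d.contains o = true
    · rw [if_pos h]
      have hc' : (d.modify o [] (fun l => l ++ [k])).contains c = true := by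
        rw [PySem.Dict.contains_modify]; simp [hc]
      rw [ih _ hc', PySem.Dict.getD_modify]
      by_cases hco : c = o
      · subst hco; simp
      · have : (o == c) = false := by simp [Ne.symm hco]
        simp [hco, this]
    · rw [if_neg h, ih _ hc]
      have : (o == c) = false := by
        by_contra hb
        have : o = c := by simpa using hb
        subst this; exact h hc
      simp [this]

theorem pvScatter_keys (data : List (String × String × List String)) (d : PySem.Dict String (List String)) :
    (data.foldl
        (fun d kv =>
          kv.2.2.foldl (fun d output => if d.contains output then d.modify output [] (fun l => l ++ [kv.1]) else d) d)
        d).keys = d.keys := by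
  induction data generalizing d with
  | nil => rfl
  | cons kv t ih => rw [List.foldl_cons, ih, pvInner_keys]

-- the whole scatter pass appends, to each present key, the sources of all edges into it, in traversal order
theorem pvScatter_getD (data : List (String × String × List String)) (c : String)
    (d : PySem.Dict String (List String)) (hc : d.contains c = true) :
    (data.foldl
        (fun d kv =>
          kv.2.2.foldl (fun d output => if d.contains output then d.modify output [] (fun l => l ++ [kv.1]) else d) d)
        d).getD c []
      = d.getD c [] ++ data.flatMap (fun kv => (kv.2.2.filter (fun out => out == c)).map (fun _ => kv.1)) := by
  induction data generalizing d with
  | nil => simp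
  | cons kv t ih =>
    rw [List.foldl_cons, List.flatMap_cons,
      ih _ (by rw [pvInner_contains]; exact hc), pvInner_getD _ _ _ _ hc, List.append_assoc]

-- with distinct keys a dict's items are its keys paired with their values
theorem pvItems_eq (d : PySem.Dict String (List String)) (h : d.keys.Nodup) :
    d.items = d.keys.map (fun k => (k, d.getD k [])) := by
  have hk : d.keys = d.items.map (fun p => p.1) := by simp only [PySem.Dict.keys]
  rw [hk, List.map_map]
  exact (pvMapSelf _ _ (fun p hp => by
    have := PySem.Dict.getD_of_mem_items d (k := p.1) (v := p.2) (by simpa using hp) (hk ▸ h) []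
    simp [Function.comp, this])).symm

-- A's dict comprehension, as an items list
theorem pvD0_items (data : List (String × String × List String))
    (h : Pre_get_inputs_for_conjunctions data) :
    (data.foldl (fun d kv => if kv.2.1 == "&" then d.insert kv.1 ([] : List String) else d)
        PySem.Dict.empty).items
      = (data.filter (fun kv => kv.2.1 == "&")).map (fun kv => (kv.1, ([] : List String))) := by
  have hnd : ((data.filter (fun kv => kv.2.1 == "&")).map (fun kv : String × String × List String => kv.1)).Nodup :=
    h.sublist (List.filter_sublist.map _)
  rw [← List.foldl_filter,
    PySem.Dict.items_foldl_insert_fresh (l := data.filter (fun kv => kv.2.1 == "&"))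
      (k := fun kv : String × String × List String => kv.1) (v := fun _ => ([] : List String))
      PySem.Dict.empty (fun a _ => PySem.Dict.contains_empty _) hnd]
  rfl

-- ===== VERDICT (by name: the statement is the Claim_ definition above) =====
theorem get_inputs_for_conjunctions_spec : Claim_equal_get_inputs_for_conjunctions := by
  intro data _ hpre
  unfold Spec_get_inputs_for_conjunctions get_inputs_for_conjunctions get_inputs_for_conjunctions_alt
  have hd0 := pvD0_items data hpre
  set d0 := data.foldl (fun d kv => if kv.2.1 == "&" then d.insert kv.1 ([] : List String) else d)
      PySem.Dict.empty with hd0def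
  have hkeys : d0.keys = (data.filter (fun kv => kv.2.1 == "&")).map (fun kv => kv.1) := by
    simp only [PySem.Dict.keys, hd0, List.map_map]
    simp
  have hnd : d0.keys.Nodup := by
    rw [hkeys]; exact hpre.sublist (List.filter_sublist.map _)
  set D := data.foldl
      (fun d kv =>
        kv.2.2.foldl (fun d output => if d.contains output then d.modify output [] (fun l => l ++ [kv.1]) else d) d)
      d0 with hDdef
  have hDkeys : D.keys = d0.keys := pvScatter_keys data d0
  rw [pvItems_eq D (hDkeys ▸ hnd), hDkeys, hkeys, List.map_map, List.map_map]
  apply List.map_congr_left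
  intro kv hkv
  have hmem : kv.1 ∈ d0.keys := by
    rw [hkeys]; exact List.mem_map_of_mem hkv
  have hcont : d0.contains kv.1 = true := (PySem.Dict.contains_iff_mem_keys d0 kv.1).mpr hmem
  have hgd0 : d0.getD kv.1 [] = [] :=
    PySem.Dict.getD_of_mem_items d0 (k := kv.1) (v := [])
      (by rw [hd0]; exact List.mem_map_of_mem hkv) hnd []
  simp only [Function.comp_apply]
  rw [hDdef, pvScatter_getD data kv.1 d0 hcont, hgd0]
  simp
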